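-- pv_equiv track=rewrite | github.com/TopDevPros/solidlibs | net/utils.py | host_in_domain
-- ===== SOURCE A (Python) =====
-- def host_in_domain(host, domain):
--     ''' Returns:
--             True if host is equal to or a subdomain of domain.
--             Else returns False.
--
--         >>> host_in_domain('www.example.com', 'example.com')
--         True
--         >>> host_in_domain('example.com', 'www.example.com')
--         False
--     '''
--
--     if not host:
--         raise ValueError('host required')
--     if not domain:
--         raise ValueError('domain required')
--
--     is_match = False
--     while host and not is_match:
--         if host == domain:
--             is_match = True
--             # log(f'{original_host} is in domain {domain}')
--
--         # remove leftmost subdomain from host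
--         __, __, host = host.partition('.')
--
--     return is_match
-- ===== SOURCE B (Python) =====
-- def host_in_domain(host, domain):
--     ''' Returns True if host is equal to or a subdomain of domain, else False. '''
--     if not host:
--         raise ValueError('host required')
--     if not domain:
--         raise ValueError('domain required')
--     return host == domain or host.endswith('.' + domain)
-- ===== Notes on version B (the rewrite author's own statement) =====
-- stated objective: simpler
-- what changed: The while-loop that repeatedly strips the leftmost label with partition('.') and compares at each step is replaced by a single closed-form test: host == domain or host.endswith('.' + domain).
import Mathlib
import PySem

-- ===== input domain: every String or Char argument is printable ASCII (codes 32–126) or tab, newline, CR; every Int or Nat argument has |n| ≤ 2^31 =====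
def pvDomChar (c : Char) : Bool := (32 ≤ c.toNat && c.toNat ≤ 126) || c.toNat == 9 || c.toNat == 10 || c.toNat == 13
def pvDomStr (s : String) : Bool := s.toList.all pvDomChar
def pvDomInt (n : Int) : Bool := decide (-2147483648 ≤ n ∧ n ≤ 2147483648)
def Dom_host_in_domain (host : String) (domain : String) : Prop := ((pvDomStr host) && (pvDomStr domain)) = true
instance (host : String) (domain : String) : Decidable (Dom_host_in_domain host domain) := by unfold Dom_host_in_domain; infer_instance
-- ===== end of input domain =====

-- B replaces A's label-stripping while-loop by one closed-form suffix test (objective: simpler).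

-- ===== PORT A =====
-- hand port of `__, __, host = host.partition('.')`: the part after the first '.',
-- or [] when there is no '.' (Python partition yields '' then) — exact for a 1-char separator
def pvPartAfter (l : List Char) : List Char :=
  match l with
  | [] => []
  | c :: t => if c = '.' then t else pvPartAfter t

theorem pvPartAfter_length_le (l : List Char) : (pvPartAfter l).length ≤ l.length := by
  induction l with
  | nil => simp [pvPartAfter]
  | cons c t ih =>
    simp only [pvPartAfter]
    split
    · simp
    · exact Nat.le_trans ih (Nat.le_succ _)

theorem pvPartAfter_length_lt (l : List Char) (h : l ≠ []) :
    (pvPartAfter l).length < l.length := by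
  cases l with
  | nil => exact absurd rfl h
  | cons c t =>
    simp only [pvPartAfter]
    split
    · simp
    · exact Nat.lt_succ_of_le (pvPartAfter_length_le t)

-- the while-loop of A, state = (host, is_match)
def hidLoop (host : List Char) (domain : List Char) (is_match : Bool) : Bool :=
  if hg : host ≠ [] ∧ is_match = false then
    hidLoop (pvPartAfter host) domain (if host = domain then true else is_match)
  else is_match
termination_by host.length
decreasing_by exact pvPartAfter_length_lt host hg.1

def host_in_domain (host : String) (domain : String) : Bool :=
  if host = "" then false        -- Python raises ValueError here; excluded by Pre_
  else if domain = "" then false -- Python raises ValueError here; excluded by Pre_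
  else hidLoop host.toList domain.toList false

-- ===== PORT B =====
def host_in_domain_alt (host : String) (domain : String) : Bool :=
  if host = "" then false        -- Python raises ValueError here; excluded by Pre_
  else if domain = "" then false -- Python raises ValueError here; excluded by Pre_
  else host == domain || PySem.Str.endswith host ("." ++ domain)

-- ===== PRECONDITION & SPEC =====
-- A raises ValueError on empty host or empty domain; exactly those inputs are excluded.
def Pre_host_in_domain (host : String) (domain : String) : Prop := host ≠ "" ∧ domain ≠ ""
instance (host : String) (domain : String) : Decidable (Pre_host_in_domain host domain) := by
  unfold Pre_host_in_domain; infer_instance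
def pvWitness_host_in_domain : String × String := ("www.example.com", "example.com")

def Spec_host_in_domain (host : String) (domain : String) (out : Bool) : Prop := out = host_in_domain_alt host domain
instance (host : String) (domain : String) (out : Bool) : Decidable (Spec_host_in_domain host domain out) := by unfold Spec_host_in_domain; infer_instance

-- ===== CLAIM (what is proved, stated in full; the proofs are below) =====
def Claim_equal_host_in_domain : Prop := ∀ (host : String) (domain : String), Dom_host_in_domain host domain → Pre_host_in_domain host domain → Spec_host_in_domain host domain (host_in_domain host domain)

-- ===== LEMMAS AND PROOFS =====

-- one partition step, as a statement about suffixes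
theorem suffix_iff_partAfter (d : List Char) (hd : d ≠ []) :
    ∀ h : List Char, (('.' :: d) <:+ h ↔ (pvPartAfter h = d ∨ ('.' :: d) <:+ pvPartAfter h)) := by
  intro h
  induction h with
  | nil =>
    simp only [pvPartAfter, List.suffix_nil]
    constructor
    · intro hs; exact absurd hs (by simp)
    · rintro (h1 | h2)
      · exact absurd h1.symm hd
      · exact absurd h2 (by simp)
    
  | cons c t ih =>
    rw [List.suffix_cons_iff]
    simp only [pvPartAfter]
    by_cases hc : c = '.'
    · subst hc
      simp only [if_pos, List.cons.injEq, true_and]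
      constructor
      · rintro (h1 | h2)
        · exact Or.inl h1.symm
        · exact Or.inr h2
      · rintro (h1 | h2)
        · exact Or.inl h1.symm
        · exact Or.inr h2
    · rw [if_neg hc]
      constructor
      · rintro (h1 | h2)
        · exact absurd (List.cons.injEq .. ▸ h1).1.symm hc
        · exact (ih.mp h2)
      · intro hr; exact Or.inr (ih.mpr hr)

-- characterisation of A's loop: it finds domain as the whole host or after some '.'
theorem hidLoop_true : ∀ (d : List Char) (t : List Char) (n : ℕ), t.length ≤ n → hidLoop t d true = true := by
  intro d t n hn
  rw [hidLoop]
  simp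

theorem hidLoop_nil_rhs (d : List Char) (hd : d ≠ []) :
    (decide (([] : List Char) = d) || PySem.Chars.endswith ([] : List Char) ('.' :: d)) = false := by
  have h1 : decide (([] : List Char) = d) = false := decide_eq_false (fun hc => hd hc.symm)
  have h2 : PySem.Chars.endswith ([] : List Char) ('.' :: d) = false := by
    rw [Bool.eq_false_iff]
    intro hc
    have := (PySem.Chars.endswith_iff _ _).mp hc
    simp at this
  rw [h1, h2, Bool.or_self]

theorem hidLoop_eq (d : List Char) (hd : d ≠ []) :
    ∀ (n : ℕ) (h : List Char), h.length ≤ n →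
      hidLoop h d false = (decide (h = d) || PySem.Chars.endswith h ('.' :: d)) := by
  intro n
  induction n with
  | zero =>
    intro h hn
    have h0 : h = [] := List.eq_nil_of_length_eq_zero (Nat.le_zero.mp hn)
    subst h0
    rw [hidLoop]
    simp only [ne_eq, not_true_eq_false, false_and, dite_false]
    rw [hidLoop_nil_rhs d hd]
  | succ n ih =>
    intro h hn
    rcases List.eq_nil_or_concat' h with h0 | _
    · subst h0
      rw [hidLoop]
      simp only [ne_eq, not_true_eq_false, false_and, dite_false]
      rw [hidLoop_nil_rhs d hd]
    · rename_i hne0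
      have hne : h ≠ [] := by rcases hne0 with ⟨l, a, rfl⟩; simp
      rw [hidLoop]
      rw [dif_pos ⟨hne, rfl⟩]
      by_cases hhd : h = d
      · rw [if_pos hhd]
        rw [hidLoop_true d (pvPartAfter h) n
          (Nat.le_of_lt_succ (Nat.lt_of_lt_of_le (pvPartAfter_length_lt h hne) hn))]
        rw [decide_eq_true hhd, Bool.true_or]
      · rw [if_neg hhd]
        have hlen : (pvPartAfter h).length ≤ n :=
          Nat.le_of_lt_succ (Nat.lt_of_lt_of_le (pvPartAfter_length_lt h hne) hn)
        rw [ih (pvPartAfter h) hlen]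
        rw [decide_eq_false hhd, Bool.false_or]
        rw [Bool.eq_iff_iff]
        simp only [Bool.or_eq_true, decide_eq_true_eq, PySem.Chars.endswith_iff _ _]
        exact ((suffix_iff_partAfter d hd h).symm)

-- ===== VERDICT (by name: the statement is the Claim_ definition above) =====
theorem host_in_domain_spec : Claim_equal_host_in_domain := by
  intro host domain _ hpre
  unfold Spec_host_in_domain host_in_domain host_in_domain_alt
  rw [if_neg hpre.1, if_neg hpre.1, if_neg hpre.2, if_neg hpre.2]
  have hd : domain.toList ≠ [] := by
    intro hc; exact hpre.2 (String.toList_eq_nil_iff.mp hc)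
  rw [hidLoop_eq domain.toList hd host.toList.length host.toList (le_refl _)]
  have h1 : (host == domain) = decide (host.toList = domain.toList) := by
    rw [Bool.eq_iff_iff]
    simp [← String.toList_inj]
  have h2 : PySem.Str.endswith host ("." ++ domain)
      = PySem.Chars.endswith host.toList ('.' :: domain.toList) := by
    simp [PySem.Str.endswith]
  rw [h1, h2]
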